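-- pv_equiv track=rewrite | github.com/spineoncode/PyProjects | FLAMESgame.py | remCharMatch
-- ===== SOURCE A (Python) =====
-- def splitChar(strVal):
--     result = []
--     for char in strVal:
--         result.append(char)
--     return result
--
-- def remCharMatch(Name_1, Name_2):
--     Name_1, Name_2 = splitChar(Name_1.upper()), splitChar(Name_2.upper())
--     common = set()
--     for char in Name_1:
--         for char_2 in Name_2:
--             if char == char_2:
--                 common.add(char)
--     common = list(common)
--     for i in range(len(common)):
--         Name_1.remove(common[i])
--         Name_2.remove(common[i])
--     result = (len(Name_1) + len(Name_2)) - 1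
--     return result
-- ===== SOURCE B (Python) =====
-- def remCharMatch(Name_1, Name_2):
--     common = set(Name_1.upper()) & set(Name_2.upper())
--     return len(Name_1) + len(Name_2) - 2 * len(common) - 1
-- ===== Notes on version B (the rewrite author's own statement) =====
-- stated objective: faster
-- what changed: Replaces the O(n*m) nested character scan plus repeated list.remove passes by a closed form: build the two uppercase character sets once and return len1+len2-2*|set1&set2|-1.
import Mathlib
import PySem

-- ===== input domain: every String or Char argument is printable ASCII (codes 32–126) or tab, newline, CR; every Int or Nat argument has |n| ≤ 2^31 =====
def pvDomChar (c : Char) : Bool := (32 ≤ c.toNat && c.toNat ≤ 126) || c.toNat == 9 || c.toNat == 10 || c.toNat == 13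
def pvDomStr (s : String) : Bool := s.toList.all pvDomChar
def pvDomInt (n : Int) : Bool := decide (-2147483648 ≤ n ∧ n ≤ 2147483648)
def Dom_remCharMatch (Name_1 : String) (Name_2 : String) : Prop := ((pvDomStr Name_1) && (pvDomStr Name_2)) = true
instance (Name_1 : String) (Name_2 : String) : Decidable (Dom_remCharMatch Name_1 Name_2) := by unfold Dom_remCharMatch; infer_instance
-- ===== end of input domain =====

-- B replaces A's nested O(n*m) scan and per-character remove passes by the closed form
-- len1 + len2 - 2*|set1 & set2| - 1 (objective: faster, asymptotic).

-- ===== PORT A =====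
def splitChar (strVal : List Char) : List Char :=
  strVal.foldl (fun result c => result ++ [c]) []

def remCharMatch (Name_1 : String) (Name_2 : String) : Int :=
  let l1 := splitChar (PySem.Str.upper Name_1).toList
  let l2 := splitChar (PySem.Str.upper Name_2).toList
  let common : PySem.Set Char :=
    l1.foldl (fun s c =>
      l2.foldl (fun s c2 => if c == c2 then PySem.Set.add s c else s) s) PySem.Set.empty
  -- list.remove: each element of `common` occurs in both lists, so Python's remove never
  -- raises here; the total form `(remove? …).getD` is exact on every reachable state.
  let final := common.foldl (fun (p : List Char × List Char) c =>
      ((PySem.List.remove? p.1 c).getD p.1, (PySem.List.remove? p.2 c).getD p.2)) (l1, l2)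
  ((final.1.length : Int) + (final.2.length : Int)) - 1

-- ===== PORT B =====
def remCharMatch_alt (Name_1 : String) (Name_2 : String) : Int :=
  let common := PySem.Set.inter (PySem.Set.ofList (PySem.Str.upper Name_1).toList)
                                (PySem.Set.ofList (PySem.Str.upper Name_2).toList)
  ((Name_1.toList.length : Int) + (Name_2.toList.length : Int)) - 2 * (common.length : Int) - 1

-- ===== PRECONDITION & SPEC =====
def Spec_remCharMatch (Name_1 : String) (Name_2 : String) (out : Int) : Prop := out = remCharMatch_alt Name_1 Name_2
instance (Name_1 : String) (Name_2 : String) (out : Int) : Decidable (Spec_remCharMatch Name_1 Name_2 out) := by unfold Spec_remCharMatch; infer_instance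

-- ===== CLAIM (what is proved, stated in full; the proofs are below) =====
def Claim_equal_remCharMatch : Prop := ∀ (Name_1 : String) (Name_2 : String), Dom_remCharMatch Name_1 Name_2 → Spec_remCharMatch Name_1 Name_2 (remCharMatch Name_1 Name_2)

-- ===== LEMMAS AND PROOFS =====

theorem foldl_append_acc (l acc : List Char) :
    l.foldl (fun result c => result ++ [c]) acc = acc ++ l := by
  induction l generalizing acc with
  | nil => simp
  | cons c t ih => simp [List.foldl, ih]

theorem splitChar_eq (l : List Char) : splitChar l = l := by
  simpa [splitChar] using foldl_append_acc l []

-- the inner loop over Name_2 adds `c` iff it occurs in l2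
theorem inner_fold_eq (l2 : List Char) (s : PySem.Set Char) (c : Char) :
    l2.foldl (fun s c2 => if c == c2 then PySem.Set.add s c else s) s
      = (if c ∈ l2 then PySem.Set.add s c else s) := by
  induction l2 generalizing s with
  | nil => simp
  | cons c2 t ih =>
    rw [List.foldl_cons]
    by_cases h : c = c2
    · subst h
      rw [if_pos (by simp), ih]
      by_cases hm : c ∈ t
      · simp [hm, PySem.Set.add_of_mem, PySem.Set.mem_add]
      · simp [hm]
    · rw [if_neg (by simpa using h), ih]
      simp [h]

theorem outer_mem (l1 l2 : List Char) (s : PySem.Set Char) (x : Char) :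
    x ∈ l1.foldl (fun s c => if c ∈ l2 then PySem.Set.add s c else s) s
      ↔ x ∈ s ∨ (x ∈ l1 ∧ x ∈ l2) := by
  induction l1 generalizing s with
  | nil => simp
  | cons c t ih =>
    rw [List.foldl_cons, ih]
    by_cases h : c ∈ l2
    · simp only [if_pos h, PySem.Set.mem_add, List.mem_cons]
      constructor
      · rintro ((hx | rfl) | hx)
        · exact Or.inl hx
        · exact Or.inr ⟨Or.inl rfl, h⟩
        · exact Or.inr ⟨Or.inr hx.1, hx.2⟩
      · rintro (hx | ⟨(rfl | hx), h2⟩)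
        · exact Or.inl (Or.inl hx)
        · exact Or.inl (Or.inr rfl)
        · exact Or.inr ⟨hx, h2⟩
    · simp only [if_neg h, List.mem_cons]
      constructor
      · rintro (hx | hx)
        · exact Or.inl hx
        · exact Or.inr ⟨Or.inr hx.1, hx.2⟩
      · rintro (hx | ⟨(rfl | hx), h2⟩)
        · exact Or.inl hx
        · exact absurd h2 h
        · exact Or.inr ⟨hx, h2⟩

theorem outer_nodup (l1 l2 : List Char) (s : PySem.Set Char) (h : s.Nodup) :
    (l1.foldl (fun s c => if c ∈ l2 then PySem.Set.add s c else s) s).Nodup := by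
  induction l1 generalizing s with
  | nil => exact h
  | cons c t ih =>
    rw [List.foldl_cons]
    split
    · exact ih _ (PySem.Set.nodup_add _ _ h)
    · exact ih _ h

theorem remove_fold_len (common l1 l2 : List Char) (hnd : common.Nodup)
    (h : ∀ c ∈ common, c ∈ l1 ∧ c ∈ l2) :
    (common.foldl (fun (p : List Char × List Char) c =>
        ((PySem.List.remove? p.1 c).getD p.1, (PySem.List.remove? p.2 c).getD p.2)) (l1, l2)).1.length
    + (common.foldl (fun (p : List Char × List Char) c =>
        ((PySem.List.remove? p.1 c).getD p.1, (PySem.List.remove? p.2 c).getD p.2)) (l1, l2)).2.length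
    + 2 * common.length = l1.length + l2.length := by
  induction common generalizing l1 l2 with
  | nil => simp
  | cons c t ih =>
    rcases h c (List.mem_cons_self) with ⟨h1, h2⟩
    rw [List.foldl_cons]
    have e1 : (PySem.List.remove? l1 c).getD l1 = l1.erase c := by
      rw [PySem.List.remove?_eq_some_erase _ _ h1]; rfl
    have e2 : (PySem.List.remove? l2 c).getD l2 = l2.erase c := by
      rw [PySem.List.remove?_eq_some_erase _ _ h2]; rfl
    have hnd' := hnd.of_cons
    have hc : c ∉ t := (List.nodup_cons.mp hnd).1
    have hmem : ∀ c' ∈ t, c' ∈ l1.erase c ∧ c' ∈ l2.erase c := by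
      intro c' hc'
      have hne : c' ≠ c := fun e => hc (e ▸ hc')
      rcases h c' (List.mem_cons_of_mem _ hc') with ⟨m1, m2⟩
      exact ⟨(List.mem_erase_of_ne hne).mpr m1, (List.mem_erase_of_ne hne).mpr m2⟩
    have := ih (l1.erase c) (l2.erase c) hnd' hmem
    have g1 := List.length_erase_add_one h1
    have g2 := List.length_erase_add_one h2
    simp only [e1, e2, List.length_cons]
    omega

-- ===== VERDICT (by name: the statement is the Claim_ definition above) =====
theorem remCharMatch_spec : Claim_equal_remCharMatch := by
  intro N1 N2 _
  unfold Spec_remCharMatch remCharMatch remCharMatch_alt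
  simp only [splitChar_eq, inner_fold_eq]
  set u1 := (PySem.Str.upper N1).toList with hu1
  set u2 := (PySem.Str.upper N2).toList with hu2
  set common := u1.foldl (fun s c => if c ∈ u2 then PySem.Set.add s c else s) PySem.Set.empty with hcom
  have hnd : common.Nodup := outer_nodup u1 u2 _ List.nodup_nil
  have hmem : ∀ x, x ∈ common ↔ x ∈ u1 ∧ x ∈ u2 := by
    intro x
    rw [hcom, outer_mem]
    simp [PySem.Set.empty]
  have hrm := remove_fold_len common u1 u2 hnd (fun c hc => (hmem c).mp hc)
  have hk : common.length = (PySem.Set.inter (PySem.Set.ofList u1) (PySem.Set.ofList u2)).length := by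
    have hp : common.Perm (PySem.Set.inter (PySem.Set.ofList u1) (PySem.Set.ofList u2)) := by
      rw [List.perm_ext_iff_of_nodup hnd (PySem.Set.nodup_inter _ _ (PySem.Set.nodup_ofList _))]
      intro a
      rw [hmem]
      simp [PySem.Set.mem_inter, PySem.Set.mem_ofList]
    exact hp.length_eq
  have hl1 : u1.length = N1.toList.length := by
    simp [hu1, PySem.Chars.upper]
  have hl2 : u2.length = N2.toList.length := by
    simp [hu2, PySem.Chars.upper]
  omega
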